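-- pv_equiv track=rewrite | github.com/emoronayuso/scraping-US | spider-ENI-SOLFA/graphs/general.py | map_color_type_link
-- ===== SOURCE A (Python) =====
-- def map_color_type_link(exten):
--     map_group = {    're': {'color': "#7DD7FD", 'ext': ['pdf']},
--                   'no_re': {'color': "#FA964A", 'ext': ['docx', 'xlsx', 'pptx']},
--                      'st': {'color': "#6BE666", 'ext': ['odt', 'ods', 'odg', 'odp']},
--                   'no_st': {'color': "#EF5555", 'ext': ['doc', 'xls', 'ppt']}
--                 }
--
--     for group_ext in map_group.keys():
--         for ext in map_group[group_ext]['ext']: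
--             if exten == ext:
--                 return map_group[group_ext]['color']
--
--     return "#FFFFAA"
-- ===== SOURCE B (Python) =====
-- def map_color_type_link(exten):
--     colors = {'pdf': "#7DD7FD",
--               'docx': "#FA964A", 'xlsx': "#FA964A", 'pptx': "#FA964A",
--               'odt': "#6BE666", 'ods': "#6BE666", 'odg': "#6BE666", 'odp': "#6BE666",
--               'doc': "#EF5555", 'xls': "#EF5555", 'ppt': "#EF5555"}
--     return colors.get(exten, "#FFFFAA")
-- ===== Notes on version B (the rewrite author's own statement) =====
-- stated objective: simpler
-- what changed: Replaces the nested group dictionary and the two nested scan loops with one flat extension-to-color dictionary and a single .get lookup with a default.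
import Mathlib
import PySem

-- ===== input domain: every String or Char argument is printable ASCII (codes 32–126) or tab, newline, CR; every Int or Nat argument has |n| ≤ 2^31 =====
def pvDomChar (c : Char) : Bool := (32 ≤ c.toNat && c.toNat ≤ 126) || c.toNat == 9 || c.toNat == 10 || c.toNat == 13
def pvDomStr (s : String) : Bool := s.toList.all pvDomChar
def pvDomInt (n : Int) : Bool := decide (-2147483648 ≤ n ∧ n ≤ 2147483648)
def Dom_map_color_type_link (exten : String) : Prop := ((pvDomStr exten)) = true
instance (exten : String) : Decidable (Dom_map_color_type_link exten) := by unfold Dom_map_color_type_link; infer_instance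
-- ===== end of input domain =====

-- B replaces the nested group dict and two scanning loops with one flat ext→color dict lookup (simpler).


-- ===== PORT A =====
-- map_group: group name ↦ (color, extension list), in insertion order
def pvMapGroup : List (String × String × List String) :=
  [("re", ("#7DD7FD", ["pdf"])),
   ("no_re", ("#FA964A", ["docx", "xlsx", "pptx"])),
   ("st", ("#6BE666", ["odt", "ods", "odg", "odp"])),
   ("no_st", ("#EF5555", ["doc", "xls", "ppt"]))]

-- inner loop: for ext in exts: if exten == ext: return color
def pvInner (exten color : String) : List String → Option String
  | [] => none
  | ext :: rest => if exten == ext then some color else pvInner exten color rest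

-- outer loop over the groups, with the fallthrough return
def pvOuter (exten : String) : List (String × String × List String) → String
  | [] => "#FFFFAA"
  | (_, (color, exts)) :: rest =>
      match pvInner exten color exts with
      | some c => c
      | none => pvOuter exten rest

def map_color_type_link (exten : String) : String := pvOuter exten pvMapGroup

-- ===== PORT B =====
def pvColors : PySem.Dict String String :=
  ⟨[("pdf", "#7DD7FD"),
    ("docx", "#FA964A"), ("xlsx", "#FA964A"), ("pptx", "#FA964A"),
    ("odt", "#6BE666"), ("ods", "#6BE666"), ("odg", "#6BE666"), ("odp", "#6BE666"),
    ("doc", "#EF5555"), ("xls", "#EF5555"), ("ppt", "#EF5555")]⟩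

def map_color_type_link_alt (exten : String) : String :=
  PySem.Dict.getD pvColors exten "#FFFFAA"

-- ===== PRECONDITION & SPEC =====
def Spec_map_color_type_link (exten : String) (out : String) : Prop := out = map_color_type_link_alt exten
instance (exten : String) (out : String) : Decidable (Spec_map_color_type_link exten out) := by unfold Spec_map_color_type_link; infer_instance

-- ===== CLAIM (what is proved, stated in full; the proofs are below) =====
def Claim_equal_map_color_type_link : Prop := ∀ (exten : String), Dom_map_color_type_link exten → Spec_map_color_type_link exten (map_color_type_link exten)

-- ===== LEMMAS AND PROOFS =====

-- ===== VERDICT (by name: the statement is the Claim_ definition above) =====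
theorem map_color_type_link_spec : Claim_equal_map_color_type_link := by
  intro e _
  unfold Spec_map_color_type_link map_color_type_link map_color_type_link_alt
  by_cases h1 : e = "pdf"
  · subst h1; rfl
  by_cases h2 : e = "docx"
  · subst h2; rfl
  by_cases h3 : e = "xlsx"
  · subst h3; rfl
  by_cases h4 : e = "pptx"
  · subst h4; rfl
  by_cases h5 : e = "odt"
  · subst h5; rfl
  by_cases h6 : e = "ods"
  · subst h6; rfl
  by_cases h7 : e = "odg"
  · subst h7; rfl
  by_cases h8 : e = "odp"
  · subst h8; rfl
  by_cases h9 : e = "doc"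
  · subst h9; rfl
  by_cases h10 : e = "xls"
  · subst h10; rfl
  by_cases h11 : e = "ppt"
  · subst h11; rfl
  have q1 : (e == "pdf") = false := beq_eq_false_iff_ne.mpr h1
  have q2 : (e == "docx") = false := beq_eq_false_iff_ne.mpr h2
  have q3 : (e == "xlsx") = false := beq_eq_false_iff_ne.mpr h3
  have q4 : (e == "pptx") = false := beq_eq_false_iff_ne.mpr h4
  have q5 : (e == "odt") = false := beq_eq_false_iff_ne.mpr h5
  have q6 : (e == "ods") = false := beq_eq_false_iff_ne.mpr h6
  have q7 : (e == "odg") = false := beq_eq_false_iff_ne.mpr h7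
  have q8 : (e == "odp") = false := beq_eq_false_iff_ne.mpr h8
  have q9 : (e == "doc") = false := beq_eq_false_iff_ne.mpr h9
  have q10 : (e == "xls") = false := beq_eq_false_iff_ne.mpr h10
  have q11 : (e == "ppt") = false := beq_eq_false_iff_ne.mpr h11
  have r1 : ("pdf" == e) = false := beq_eq_false_iff_ne.mpr (fun h => h1 h.symm)
  have r2 : ("docx" == e) = false := beq_eq_false_iff_ne.mpr (fun h => h2 h.symm)
  have r3 : ("xlsx" == e) = false := beq_eq_false_iff_ne.mpr (fun h => h3 h.symm)
  have r4 : ("pptx" == e) = false := beq_eq_false_iff_ne.mpr (fun h => h4 h.symm)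
  have r5 : ("odt" == e) = false := beq_eq_false_iff_ne.mpr (fun h => h5 h.symm)
  have r6 : ("ods" == e) = false := beq_eq_false_iff_ne.mpr (fun h => h6 h.symm)
  have r7 : ("odg" == e) = false := beq_eq_false_iff_ne.mpr (fun h => h7 h.symm)
  have r8 : ("odp" == e) = false := beq_eq_false_iff_ne.mpr (fun h => h8 h.symm)
  have r9 : ("doc" == e) = false := beq_eq_false_iff_ne.mpr (fun h => h9 h.symm)
  have r10 : ("xls" == e) = false := beq_eq_false_iff_ne.mpr (fun h => h10 h.symm)
  have r11 : ("ppt" == e) = false := beq_eq_false_iff_ne.mpr (fun h => h11 h.symm)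
  simp [pvOuter, pvInner, pvMapGroup, pvColors, PySem.Dict.getD, PySem.Dict.get?, List.find?, r1, r2, r3, r4, r5, r6, r7, r8, r9, r10, r11, q1, q2, q3, q4, q5, q6, q7, q8, q9, q10, q11]
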